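-- pv_equiv track=rewrite | github.com/macterra/Axio | src/toy_axionic_kernel_integrity/src/toy_aki/als/harness.py | _compute_capability_groups
-- ===== SOURCE A (Python) =====
-- def _compute_capability_groups(action_types: frozenset) -> int:
--     """
--     Compute number of distinct capability groups from action types.
--
--     Groups:
--     - Movement: MOVE_*, MOVE_LEFT, MOVE_RIGHT
--     - Wait: WAIT
--     - Resource: HARVEST, SPEND
--     - Misc: Any others
--
--     Returns count of groups present.
--     """
--     groups = set()
--     for action in action_types:
--         if action.startswith("MOVE") or action in ("MOVE_LEFT", "MOVE_RIGHT"):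
--             groups.add("movement")
--         elif action == "WAIT":
--             groups.add("wait")
--         elif action in ("HARVEST", "SPEND"):
--             groups.add("resource")
--         else:
--             groups.add("misc")
--     return len(groups)
-- ===== SOURCE B (Python) =====
-- def _compute_capability_groups(action_types: frozenset) -> int:
--     has_movement = any(a.startswith("MOVE") for a in action_types)
--     has_wait = "WAIT" in action_types
--     has_resource = any(a in ("HARVEST", "SPEND") for a in action_types)
--     has_misc = any(
--         not a.startswith("MOVE") and a != "WAIT" and a not in ("HARVEST", "SPEND")
--         for a in action_types
--     )
--     return has_movement + has_wait + has_resource + has_misc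
-- ===== Notes on version B (the rewrite author's own statement) =====
-- stated objective: alternative
-- what changed: Replaces A's single pass that classifies each action into an accumulating set (returning its size) with four independent boolean any()/membership scans, one per capability group, summed as ints; no set is built.
import Mathlib
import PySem

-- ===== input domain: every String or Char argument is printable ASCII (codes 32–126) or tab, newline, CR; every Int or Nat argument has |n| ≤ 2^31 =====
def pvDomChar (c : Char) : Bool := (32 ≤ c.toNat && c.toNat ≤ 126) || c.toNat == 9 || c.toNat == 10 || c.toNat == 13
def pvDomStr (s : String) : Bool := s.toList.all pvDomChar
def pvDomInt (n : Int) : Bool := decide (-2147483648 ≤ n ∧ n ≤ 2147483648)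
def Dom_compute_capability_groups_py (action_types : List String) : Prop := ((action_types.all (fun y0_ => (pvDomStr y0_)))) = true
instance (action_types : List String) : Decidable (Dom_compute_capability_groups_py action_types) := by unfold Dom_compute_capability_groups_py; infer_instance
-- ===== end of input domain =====

-- B replaces A's single classifying pass over an accumulating set by four independent
-- boolean membership scans (one per capability group) summed as ints; same O(n) cost.

-- ===== PORT A =====
def compute_capability_groups_py (action_types : List String) : Int :=
  let groups : PySem.Set String :=
    action_types.foldl
      (fun g action =>
        if PySem.Str.startswith action "MOVE" || (action == "MOVE_LEFT" || action == "MOVE_RIGHT") then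
          PySem.Set.add g "movement"
        else if action == "WAIT" then
          PySem.Set.add g "wait"
        else if action == "HARVEST" || action == "SPEND" then
          PySem.Set.add g "resource"
        else
          PySem.Set.add g "misc")
      PySem.Set.empty
  PySem.Set.len groups

-- ===== PORT B =====
def compute_capability_groups_py_alt (action_types : List String) : Int :=
  let has_movement := action_types.any (fun a => PySem.Str.startswith a "MOVE")
  let has_wait := action_types.any (fun a => a == "WAIT")
  let has_resource := action_types.any (fun a => a == "HARVEST" || a == "SPEND")
  let has_misc := action_types.any (fun a =>
    !(PySem.Str.startswith a "MOVE") && !(a == "WAIT") && !(a == "HARVEST" || a == "SPEND"))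
  (if has_movement then 1 else 0) + (if has_wait then 1 else 0) +
    (if has_resource then 1 else 0) + (if has_misc then 1 else 0)

-- ===== PRECONDITION & SPEC =====
def Spec_compute_capability_groups_py (action_types : List String) (out : Int) : Prop := out = compute_capability_groups_py_alt action_types
instance (action_types : List String) (out : Int) : Decidable (Spec_compute_capability_groups_py action_types out) := by unfold Spec_compute_capability_groups_py; infer_instance

-- ===== CLAIM (what is proved, stated in full; the proofs are below) =====
def Claim_equal_compute_capability_groups_py : Prop := ∀ (action_types : List String), Dom_compute_capability_groups_py action_types → Spec_compute_capability_groups_py action_types (compute_capability_groups_py action_types)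

-- ===== LEMMAS AND PROOFS =====

-- the label A's loop body adds for a given action (same conditions, same order)
def cgLabel (action : String) : String :=
  if PySem.Str.startswith action "MOVE" || (action == "MOVE_LEFT" || action == "MOVE_RIGHT") then
    "movement"
  else if action == "WAIT" then
    "wait"
  else if action == "HARVEST" || action == "SPEND" then
    "resource"
  else
    "misc"

lemma cgStep_eq (g : PySem.Set String) (a : String) :
    (if PySem.Str.startswith a "MOVE" || (a == "MOVE_LEFT" || a == "MOVE_RIGHT") then
      PySem.Set.add g "movement"
    else if a == "WAIT" then
      PySem.Set.add g "wait"
    else if a == "HARVEST" || a == "SPEND" then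
      PySem.Set.add g "resource"
    else
      PySem.Set.add g "misc") = PySem.Set.add g (cgLabel a) := by
  unfold cgLabel
  split_ifs <;> rfl

lemma cgLoop_char (xs : List String) : ∀ (s : PySem.Set String), s.Nodup →
    (xs.foldl (fun (g : PySem.Set String) (action : String) =>
      if PySem.Str.startswith action "MOVE" || (action == "MOVE_LEFT" || action == "MOVE_RIGHT") then
        PySem.Set.add g "movement"
      else if action == "WAIT" then
        PySem.Set.add g "wait"
      else if action == "HARVEST" || action == "SPEND" then
        PySem.Set.add g "resource"
      else
        PySem.Set.add g "misc") s).Nodup ∧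
    ∀ y, y ∈ xs.foldl (fun (g : PySem.Set String) (action : String) =>
      if PySem.Str.startswith action "MOVE" || (action == "MOVE_LEFT" || action == "MOVE_RIGHT") then
        PySem.Set.add g "movement"
      else if action == "WAIT" then
        PySem.Set.add g "wait"
      else if action == "HARVEST" || action == "SPEND" then
        PySem.Set.add g "resource"
      else
        PySem.Set.add g "misc") s ↔ y ∈ s ∨ ∃ a ∈ xs, cgLabel a = y := by
  induction xs with
  | nil => intro s hs; simpa using hs
  | cons x xs ih =>
    intro s hs
    rw [List.foldl_cons, cgStep_eq]
    obtain ⟨hnd, hmem⟩ := ih (PySem.Set.add s (cgLabel x)) (PySem.Set.nodup_add s (cgLabel x) hs)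
    refine ⟨hnd, fun y => ?_⟩
    rw [hmem y, PySem.Set.mem_add]
    constructor
    · rintro ((h | h) | ⟨a, ha, rfl⟩)
      · exact Or.inl h
      · exact Or.inr ⟨x, List.mem_cons_self, h.symm⟩
      · exact Or.inr ⟨a, List.mem_cons_of_mem _ ha, rfl⟩
    · rintro (h | ⟨a, ha, rfl⟩)
      · exact Or.inl (Or.inl h)
      · rcases List.mem_cons.mp ha with rfl | ha
        · exact Or.inl (Or.inr rfl)
        · exact Or.inr ⟨a, ha, rfl⟩

lemma cgLabel_movement (a : String) :
    cgLabel a = "movement" ↔ PySem.Str.startswith a "MOVE" = true := by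
  by_cases hs : PySem.Str.startswith a "MOVE" = true
  · unfold cgLabel
    rw [if_pos (by rw [Bool.or_eq_true]; exact Or.inl hs)]
    exact iff_of_true rfl hs
  · have h1 : ¬ (a = "MOVE_LEFT" ∨ a = "MOVE_RIGHT") := by
      rintro (rfl | rfl) <;> revert hs <;> decide
    unfold cgLabel
    rw [if_neg (by simp only [Bool.or_eq_true, beq_iff_eq]; tauto)]
    split_ifs <;> exact iff_of_false (by decide) hs

lemma cgLabel_wait (a : String) : cgLabel a = "wait" ↔ a = "WAIT" := by
  by_cases hw : a = "WAIT"
  · subst hw; decide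
  · unfold cgLabel
    split_ifs <;> simp_all

lemma cgLabel_resource (a : String) :
    cgLabel a = "resource" ↔ (a = "HARVEST" ∨ a = "SPEND") := by
  by_cases hr : a = "HARVEST" ∨ a = "SPEND"
  · rcases hr with rfl | rfl <;> decide
  · unfold cgLabel
    rw [show (a == "HARVEST" || a == "SPEND") = false by
      simp only [Bool.or_eq_false_iff, beq_eq_false_iff_ne, ne_eq]; tauto]
    split_ifs <;> simp_all

lemma cgLabel_misc (a : String) :
    cgLabel a = "misc" ↔
      (PySem.Str.startswith a "MOVE" = false ∧ a ≠ "WAIT" ∧ ¬(a = "HARVEST" ∨ a = "SPEND")) := by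
  unfold cgLabel
  split_ifs with h1 h2 h3 <;> constructor <;> intro h
  · exact absurd h (by decide)
  · rw [Bool.or_eq_true] at h1
    rcases h1 with hs | h1
    · rw [h.1] at hs; exact absurd hs (by decide)
    · rw [Bool.or_eq_true, beq_iff_eq, beq_iff_eq] at h1
      rcases h1 with rfl | rfl <;> exact absurd h.1 (by decide)
  · exact absurd h (by decide)
  · exact absurd (beq_iff_eq.mp h2) h.2.1
  · exact absurd h (by decide)
  · exact absurd (by simpa using h3) h.2.2
  · refine ⟨?_, ?_, ?_⟩
    · rw [Bool.or_eq_true] at h1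
      cases hse : PySem.Str.startswith a "MOVE" with
      | false => rfl
      | true => exact absurd (Or.inl hse) h1
    · intro hEq; exact h2 (beq_iff_eq.mpr hEq)
    · intro hOr; exact h3 (by rcases hOr with rfl | rfl <;> simp)
  · rfl

lemma cgLabel_cases (a : String) :
    cgLabel a = "movement" ∨ cgLabel a = "wait" ∨ cgLabel a = "resource" ∨ cgLabel a = "misc" := by
  unfold cgLabel
  split_ifs <;> simp

-- the literal list four booleans describe
def cgL (b1 b2 b3 b4 : Bool) : List String :=
  (if b1 then ["movement"] else []) ++ (if b2 then ["wait"] else []) ++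
    (if b3 then ["resource"] else []) ++ (if b4 then ["misc"] else [])

lemma cgCount4 (l : List String) (b1 b2 b3 b4 : Bool) (hnd : l.Nodup)
    (hm : ∀ y, y ∈ l ↔ (b1 = true ∧ y = "movement") ∨ (b2 = true ∧ y = "wait") ∨
      (b3 = true ∧ y = "resource") ∨ (b4 = true ∧ y = "misc")) :
    (l.length : Int) = (if b1 then 1 else 0) + (if b2 then 1 else 0) +
      (if b3 then 1 else 0) + (if b4 then 1 else 0) := by
  have hperm : l.Perm (cgL b1 b2 b3 b4) := by
    rw [List.perm_ext_iff_of_nodup hnd (by cases b1 <;> cases b2 <;> cases b3 <;> cases b4 <;> decide)]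
    intro y
    rw [hm y]
    cases b1 <;> cases b2 <;> cases b3 <;> cases b4 <;> simp [cgL]
  rw [hperm.length_eq]
  cases b1 <;> cases b2 <;> cases b3 <;> cases b4 <;> decide

-- ===== VERDICT (by name: the statement is the Claim_ definition above) =====
theorem compute_capability_groups_py_spec : Claim_equal_compute_capability_groups_py := by
  intro xs _
  unfold Spec_compute_capability_groups_py compute_capability_groups_py compute_capability_groups_py_alt
  dsimp only
  obtain ⟨hnd, hmem⟩ := cgLoop_char xs PySem.Set.empty (by simp [PySem.Set.empty])
  simp only [PySem.Set.len]
  apply cgCount4 _ _ _ _ _ hnd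
  intro y
  rw [hmem y]
  simp only [PySem.Set.empty, List.not_mem_nil, false_or]
  constructor
  · rintro ⟨a, ha, rfl⟩
    rcases cgLabel_cases a with h | h | h | h <;> rw [h]
    · exact Or.inl ⟨List.any_eq_true.mpr ⟨a, ha, (cgLabel_movement a).mp h⟩, rfl⟩
    · refine Or.inr (Or.inl ⟨List.any_eq_true.mpr ⟨a, ha, ?_⟩, rfl⟩)
      simp [(cgLabel_wait a).mp h]
    · refine Or.inr (Or.inr (Or.inl ⟨List.any_eq_true.mpr ⟨a, ha, ?_⟩, rfl⟩))
      rcases (cgLabel_resource a).mp h with rfl | rfl <;> simp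
    · refine Or.inr (Or.inr (Or.inr ⟨List.any_eq_true.mpr ⟨a, ha, ?_⟩, rfl⟩))
      obtain ⟨h1, h2, h3⟩ := (cgLabel_misc a).mp h
      rw [PySem.Str.startswith_eq, show "MOVE".toList = ['M','O','V','E'] from rfl] at h1
      simp [h1, h2, not_or.mp h3]
  · rintro (⟨hb, rfl⟩ | ⟨hb, rfl⟩ | ⟨hb, rfl⟩ | ⟨hb, rfl⟩) <;>
      obtain ⟨a, ha, hp⟩ := List.any_eq_true.mp hb <;> refine ⟨a, ha, ?_⟩
    · exact (cgLabel_movement a).mpr hp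
    · exact (cgLabel_wait a).mpr (by simpa using hp)
    · exact (cgLabel_resource a).mpr (by simpa using hp)
    · refine (cgLabel_misc a).mpr ?_
      simp only [Bool.and_eq_true, Bool.not_eq_true'] at hp
      refine ⟨hp.1.1, by simpa using hp.1.2, by simpa [not_or] using hp.2⟩
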